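-- pv_equiv track=rewrite | github.com/sueszli/vector-database-benchmark | dataset/python-mutated/trans.py | _toggle_fexpr_quotes
-- ===== SOURCE A (Python) =====
-- from typing import Any, Callable, ClassVar, Collection, Dict, Final, Iterable, Iterator, List, Literal, Optional, Sequence, Set, Tuple, TypeVar, Union
--
-- def iter_fexpr_spans(s: str) -> Iterator[Tuple[int, int]]:
--     if False:
--         while True:
--             i = 10
--     '\n    Yields spans corresponding to expressions in a given f-string.\n    Spans are half-open ranges (left inclusive, right exclusive).\n    Assumes the input string is a valid f-string, but will not crash if the input\n    string is invalid.\n    '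
--     stack: List[int] = []
--     i = 0
--     while i < len(s):
--         if s[i] == '{':
--             if not stack and i + 1 < len(s) and (s[i + 1] == '{'):
--                 i += 2
--                 continue
--             stack.append(i)
--             i += 1
--             continue
--         if s[i] == '}':
--             if not stack:
--                 i += 1
--                 continue
--             j = stack.pop()
--             if not stack:
--                 yield (j, i + 1)
--             i += 1
--             continue
--         if stack:
--             delim = None
--             if s[i:i + 3] in ("'''", '"""'):
--                 delim = s[i:i + 3]
--             elif s[i] in ("'", '"'):
--                 delim = s[i]
--             if delim:
--                 i += len(delim)
--                 while i < len(s) and s[i:i + len(delim)] != delim: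
--                     i += 1
--                 i += len(delim)
--                 continue
--         i += 1
--
-- def _toggle_fexpr_quotes(fstring: str, old_quote: str) -> str:
--     if False:
--         i = 10
--         return i + 15
--     "\n    Toggles quotes used in f-string expressions that are `old_quote`.\n\n    f-string expressions can't contain backslashes, so we need to toggle the\n    quotes if the f-string itself will end up using the same quote. We can\n    simply toggle without escaping because, quotes can't be reused in f-string\n    expressions. They will fail to parse.\n\n    NOTE: If PEP 701 is accepted, above statement will no longer be true.\n    Though if quotes can be reused, we can simply reuse them without updates or\n    escaping, once Black figures out how to parse the new grammar.\n    "
--     new_quote = "'" if old_quote == '"' else '"'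
--     parts = []
--     previous_index = 0
--     for (start, end) in iter_fexpr_spans(fstring):
--         parts.append(fstring[previous_index:start])
--         parts.append(fstring[start:end].replace(old_quote, new_quote))
--         previous_index = end
--     parts.append(fstring[previous_index:])
--     return ''.join(parts)
-- ===== SOURCE B (Python) =====
-- def _toggle_fexpr_quotes(fstring: str, old_quote: str) -> str:
--     """Single-pass rewrite: no span generator; a brace-depth counter plus the
--     index of the outermost '{' replace the stack, and output is emitted as we go."""
--     new_quote = "'" if old_quote == '"' else '"'
--     out = []
--     i = 0
--     n = len(fstring)
--     depth = 0
--     start = 0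
--     while i < n:
--         c = fstring[i]
--         if c == '{':
--             if depth == 0 and i + 1 < n and fstring[i + 1] == '{':
--                 out.append('{{')
--                 i += 2
--                 continue
--             if depth == 0:
--                 start = i
--             depth += 1
--             i += 1
--             continue
--         if c == '}':
--             if depth == 0:
--                 out.append(c)
--                 i += 1
--                 continue
--             depth -= 1
--             if depth == 0:
--                 out.append(fstring[start:i + 1].replace(old_quote, new_quote))
--             i += 1
--             continue
--         if depth:
--             delim = None
--             if fstring[i:i + 3] in ("'''", '"""'):
--                 delim = fstring[i:i + 3]
--             elif c in ("'", '"'):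
--                 delim = c
--             if delim:
--                 i += len(delim)
--                 while i < n and fstring[i:i + len(delim)] != delim:
--                     i += 1
--                 i += len(delim)
--                 continue
--             i += 1
--             continue
--         out.append(c)
--         i += 1
--     if depth:
--         out.append(fstring[start:])
--     return ''.join(out)
-- ===== Notes on version B (the rewrite author's own statement) =====
-- stated objective: alternative
-- what changed: Replaced A's two-phase design (a span-generator that re-walks the string and a second slice/replace/join pass that keeps a parts list and a previous_index cursor) by a single left-to-right pass that tracks a brace-depth counter and the outermost-brace index instead of a stack, emitting output chunks as it goes.
import Mathlib
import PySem

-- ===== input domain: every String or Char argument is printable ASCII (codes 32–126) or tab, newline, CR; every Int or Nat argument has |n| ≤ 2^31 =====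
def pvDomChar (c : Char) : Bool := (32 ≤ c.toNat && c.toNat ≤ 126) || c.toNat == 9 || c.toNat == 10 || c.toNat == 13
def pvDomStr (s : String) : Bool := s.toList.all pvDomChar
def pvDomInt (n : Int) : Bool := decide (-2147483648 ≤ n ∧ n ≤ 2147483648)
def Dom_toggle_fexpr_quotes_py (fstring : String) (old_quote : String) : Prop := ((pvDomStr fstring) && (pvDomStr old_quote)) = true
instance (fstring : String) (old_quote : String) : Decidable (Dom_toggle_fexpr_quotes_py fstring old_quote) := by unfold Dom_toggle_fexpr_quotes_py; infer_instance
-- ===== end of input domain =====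

-- B replaces A's two-phase design (span generator + slice/join pass) by a single-pass
-- scanner with a brace-depth counter; objective: simpler/alternative decomposition.

-- ===== PORT A =====
-- shared low-level helper: the inner `while i < len(s) and s[i:i+len(delim)] != delim: i += 1`
-- loop, identical character-for-character in both Pythons
def pvSkipDelim (cs : List Char) (d : List Char) (i : Nat) : Nat :=
  if i < cs.length ∧ (cs.drop i).take d.length ≠ d then pvSkipDelim cs d (i + 1) else i
termination_by cs.length - i
decreasing_by omega

theorem pvSkipDelim_le (cs d : List Char) (i : Nat) : i ≤ pvSkipDelim cs d i := by
  unfold pvSkipDelim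
  split
  · exact le_trans (Nat.le_succ i) (pvSkipDelim_le cs d (i + 1))
  · exact le_refl i
termination_by cs.length - i
decreasing_by omega

-- iter_fexpr_spans, transliterated (the Python stack's top is the head of the list)
def pvIterSpans (cs : List Char) (stack : List Nat) (i : Nat) : List (Nat × Nat) :=
  if h : i < cs.length then
    let c := cs[i]
    if c = '{' then
      if stack = [] ∧ i + 1 < cs.length ∧ cs.getD (i + 1) ' ' = '{' then
        pvIterSpans cs stack (i + 2)
      else
        pvIterSpans cs (i :: stack) (i + 1)
    else if c = '}' then
      match stack with
      | [] => pvIterSpans cs [] (i + 1)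
      | j :: rest =>
        if rest = [] then (j, i + 1) :: pvIterSpans cs rest (i + 1)
        else pvIterSpans cs rest (i + 1)
    else if stack ≠ [] then
      -- delim found: len(delim) is the literal 3 resp. 1 whenever the branch condition holds
      if (cs.drop i).take 3 = ['\'', '\'', '\''] ∨ (cs.drop i).take 3 = ['"', '"', '"'] then
        pvIterSpans cs stack (pvSkipDelim cs ((cs.drop i).take 3) (i + 3) + 3)
      else if c = '\'' ∨ c = '"' then
        pvIterSpans cs stack (pvSkipDelim cs [c] (i + 1) + 1)
      else pvIterSpans cs stack (i + 1)
    else pvIterSpans cs stack (i + 1)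
  else []
termination_by cs.length - i
decreasing_by
  all_goals first
    | omega
    | (have h1 := pvSkipDelim_le cs ((cs.drop i).take 3) (i + 3); omega)
    | (have h1 := pvSkipDelim_le cs [cs[i]] (i + 1); omega)

-- _toggle_fexpr_quotes: slice/replace/join over the spans (string values as List Char;
-- fstring[a:b] with 0 ≤ a,b is exactly (take b).drop a, ''.join is flatten)
def toggle_fexpr_quotes_py (fstring : String) (old_quote : String) : String :=
  let new_quote : List Char := if old_quote = "\"" then ['\''] else ['"']
  let cs := fstring.toList
  let st := (pvIterSpans cs [] 0).foldl
    (fun (acc : List (List Char) × Nat) (se : Nat × Nat) =>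
      (acc.1 ++ [(cs.take se.1).drop acc.2,
                 PySem.Chars.replace ((cs.take se.2).drop se.1) old_quote.toList new_quote],
       se.2))
    ([], 0)
  String.ofList (st.1 ++ [cs.drop st.2]).flatten

-- ===== PORT B =====
-- single pass: out = emitted chunks, depth = brace depth, start = index of the
-- outermost '{' of the current span (only meaningful while depth ≠ 0)
def pvGoB (cs : List Char) (oq nq : List Char) (i depth start : Nat)
    (out : List (List Char)) : List (List Char) :=
  if h : i < cs.length then
    let c := cs[i]
    if c = '{' then
      if depth = 0 ∧ i + 1 < cs.length ∧ cs.getD (i + 1) ' ' = '{' then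
        pvGoB cs oq nq (i + 2) depth start (out ++ [['{', '{']])
      else
        pvGoB cs oq nq (i + 1) (depth + 1) (if depth = 0 then i else start) out
    else if c = '}' then
      if depth = 0 then pvGoB cs oq nq (i + 1) 0 start (out ++ [[c]])
      else if depth = 1 then
        pvGoB cs oq nq (i + 1) 0 start
          (out ++ [PySem.Chars.replace ((cs.take (i + 1)).drop start) oq nq])
      else pvGoB cs oq nq (i + 1) (depth - 1) start out
    else if depth ≠ 0 then
      -- delim found: len(delim) is the literal 3 resp. 1 whenever the branch condition holds
      if (cs.drop i).take 3 = ['\'', '\'', '\''] ∨ (cs.drop i).take 3 = ['"', '"', '"'] then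
        pvGoB cs oq nq (pvSkipDelim cs ((cs.drop i).take 3) (i + 3) + 3) depth start out
      else if c = '\'' ∨ c = '"' then
        pvGoB cs oq nq (pvSkipDelim cs [c] (i + 1) + 1) depth start out
      else pvGoB cs oq nq (i + 1) depth start out
    else pvGoB cs oq nq (i + 1) 0 start (out ++ [[c]])
  else if depth ≠ 0 then out ++ [cs.drop start] else out
termination_by cs.length - i
decreasing_by
  all_goals first
    | omega
    | (have h1 := pvSkipDelim_le cs ((cs.drop i).take 3) (i + 3); omega)
    | (have h1 := pvSkipDelim_le cs [cs[i]] (i + 1); omega)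

def toggle_fexpr_quotes_py_alt (fstring : String) (old_quote : String) : String :=
  let new_quote : List Char := if old_quote = "\"" then ['\''] else ['"']
  String.ofList (pvGoB fstring.toList old_quote.toList new_quote 0 0 0 []).flatten

-- ===== PRECONDITION & SPEC =====
def Spec_toggle_fexpr_quotes_py (fstring : String) (old_quote : String) (out : String) : Prop := out = toggle_fexpr_quotes_py_alt fstring old_quote
instance (fstring : String) (old_quote : String) (out : String) : Decidable (Spec_toggle_fexpr_quotes_py fstring old_quote out) := by unfold Spec_toggle_fexpr_quotes_py; infer_instance

-- ===== CLAIM (what is proved, stated in full; the proofs are below) =====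
def Claim_equal_toggle_fexpr_quotes_py : Prop := ∀ (fstring : String) (old_quote : String), Dom_toggle_fexpr_quotes_py fstring old_quote → Spec_toggle_fexpr_quotes_py fstring old_quote (toggle_fexpr_quotes_py fstring old_quote)

-- ===== LEMMAS AND PROOFS =====

-- A's chunk stream rendered from a span list (the value of A's foldl, flattened)
def pvRenderA (cs : List Char) (oq nq : List Char) (prev : Nat) : List (Nat × Nat) → List Char
  | [] => cs.drop prev
  | (s, e) :: rest =>
      (cs.take s).drop prev ++ PySem.Chars.replace ((cs.take e).drop s) oq nq
        ++ pvRenderA cs oq nq e rest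

theorem pvFoldA_render (cs oq nq : List Char) (spans : List (Nat × Nat)) :
    ∀ parts prev,
      ((spans.foldl
        (fun (acc : List (List Char) × Nat) (se : Nat × Nat) =>
          (acc.1 ++ [(cs.take se.1).drop acc.2,
                     PySem.Chars.replace ((cs.take se.2).drop se.1) oq nq], se.2))
        (parts, prev)).1
        ++ [cs.drop (spans.foldl
          (fun (acc : List (List Char) × Nat) (se : Nat × Nat) =>
            (acc.1 ++ [(cs.take se.1).drop acc.2,
                       PySem.Chars.replace ((cs.take se.2).drop se.1) oq nq], se.2))
          (parts, prev)).2]).flatten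
      = parts.flatten ++ pvRenderA cs oq nq prev spans := by
  induction spans with
  | nil => intro parts prev; simp [pvRenderA]
  | cons se rest ih =>
      intro parts prev
      obtain ⟨s, e⟩ := se
      simp only [List.foldl_cons]
      rw [ih]
      simp [pvRenderA]

theorem pvGoB_append (cs oq nq : List Char) :
    ∀ m i depth start, cs.length - i < m → ∀ out,
      pvGoB cs oq nq i depth start out = out ++ pvGoB cs oq nq i depth start [] := by
  intro m
  induction m with
  | zero => intro i depth start hm; omega
  | succ m ih =>
    intro i depth start hm out
    rw [pvGoB]
    conv_rhs => rw [pvGoB]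
    by_cases hi : i < cs.length
    · simp only [hi, dif_pos]
      split_ifs with h1 h2 h3 h4 h5 h6 h7
      all_goals try (have hs3 := pvSkipDelim_le cs ((cs.drop i).take 3) (i + 3))
      all_goals try (have hs1 := pvSkipDelim_le cs [cs[i]] (i + 1))
      all_goals (try conv_rhs => rw [ih _ _ _ (by omega)])
      all_goals rw [ih _ _ _ (by omega)]
      all_goals simp
    · simp only [hi, dif_neg, not_false_iff]
      split_ifs <;> simp

theorem pvSliceSplit (cs : List Char) (a b c : Nat) (hab : a ≤ b) (hb : b ≤ cs.length)
    (hbc : b ≤ c) :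
    (cs.take c).drop a = (cs.take b).drop a ++ (cs.take c).drop b := by
  have h1 : (cs.take c).take b = cs.take b := by
    rw [List.take_take, Nat.min_eq_left hbc]
  calc (cs.take c).drop a
      = ((cs.take c).take b ++ (cs.take c).drop b).drop a := by rw [List.take_append_drop]
    _ = ((cs.take c).take b).drop a ++ (cs.take c).drop b := by
        rw [List.drop_append_of_le_length (by simp [h1]; omega)]
    _ = (cs.take b).drop a ++ (cs.take c).drop b := by rw [h1]

theorem pvIterSpans_lb (cs : List Char) :
    ∀ m i stack, cs.length - i < m → (∀ j ∈ stack, j ≤ i) →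
      ∀ se ∈ pvIterSpans cs stack i, stack.getLastD i ≤ se.1 := by
  intro m
  induction m with
  | zero => intro i stack hm; omega
  | succ m ih =>
    intro i stack hm hst se hse
    rw [pvIterSpans.eq_def] at hse
    by_cases hi : i < cs.length
    · simp only [hi, dif_pos] at hse
      have hs3 := pvSkipDelim_le cs ((cs.drop i).take 3) (i + 3)
      have hs1 := pvSkipDelim_le cs [cs[i]] (i + 1)
      have hmono : ∀ i', i < i' → cs.length - i' < m →
          se ∈ pvIterSpans cs stack i' → stack.getLastD i ≤ se.1 := by
        intro i' hii hm' hse'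
        have := ih i' stack hm'
          (fun x hx => le_trans (hst x hx) (by omega)) se hse'
        rcases stack with _ | ⟨a, rest⟩
        · simp only [List.getLastD_nil] at this ⊢; omega
        · simpa [List.getLastD_cons] using this
      by_cases h1 : cs[i] = '{'
      · rw [if_pos h1] at hse
        by_cases h2 : stack = [] ∧ i + 1 < cs.length ∧ cs.getD (i + 1) ' ' = '{'
        · rw [if_pos h2] at hse
          exact hmono _ (by omega) (by omega) hse
        · rw [if_neg h2] at hse
          have := ih (i+1) (i :: stack) (by omega)
            (by intro j hj; simp only [List.mem_cons] at hj
                rcases hj with rfl | hj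
                · omega
                · exact le_trans (hst _ hj) (by omega)) se hse
          rcases stack with _ | ⟨a, rest⟩
          · simpa using this
          · simpa [List.getLastD_cons] using this
      · rw [if_neg h1] at hse
        by_cases h3 : cs[i] = '}'
        · rw [if_pos h3] at hse
          rcases stack with _ | ⟨j, rest⟩
          · exact hmono _ (by omega) (by omega) hse
          · rcases rest with _ | ⟨a, rest'⟩ <;> dsimp only at hse
            · rw [if_pos rfl] at hse
              rcases List.mem_cons.mp hse with rfl | hse
              · simp
              · have := ih (i+1) [] (by omega) (by simp) se hse
                have hj := hst j (by simp)
                simp only [List.getLastD_nil, List.getLastD_cons] at this ⊢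
                omega
            · rw [if_neg (by simp)] at hse
              have := ih (i+1) (a :: rest') (by omega)
                (by intro x hx; exact le_trans (hst x (by simp [hx])) (by omega)) se hse
              simpa [List.getLastD_cons] using this
        · rw [if_neg h3] at hse
          by_cases h4 : stack ≠ []
          · rw [if_pos h4] at hse
            by_cases h5 : (cs.drop i).take 3 = ['\'', '\'', '\''] ∨ (cs.drop i).take 3 = ['"', '"', '"']
            · rw [if_pos h5] at hse
              exact hmono _ (by omega) (by omega) hse
            · rw [if_neg h5] at hse
              by_cases h6 : cs[i] = '\'' ∨ cs[i] = '"'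
              · rw [if_pos h6] at hse
                exact hmono _ (by omega) (by omega) hse
              · rw [if_neg h6] at hse
                exact hmono _ (by omega) (by omega) hse
          · rw [if_neg h4] at hse
            exact hmono _ (by omega) (by omega) hse
    · rw [dif_neg hi] at hse
      simp at hse

theorem pvConsStep (cs oq nq : List Char) (i : Nat) (hi : i < cs.length)
    (spans : List (Nat × Nat)) (hsp : ∀ se ∈ spans, i + 1 ≤ se.1) :
    pvRenderA cs oq nq i spans = cs[i] :: pvRenderA cs oq nq (i + 1) spans := by
  rcases spans with _ | ⟨⟨s, e⟩, rest⟩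
  · simp only [pvRenderA]
    exact List.drop_eq_getElem_cons hi
  · have hs : i + 1 ≤ s := hsp (s, e) (by simp)
    simp only [pvRenderA]
    have hlt : i < (cs.take s).length := by simp; omega
    rw [List.drop_eq_getElem_cons hlt]
    simp [List.getElem_take]

theorem pvMain (cs oq nq : List Char) :
    ∀ m i, cs.length - i < m →
      ((∀ st, pvRenderA cs oq nq i (pvIterSpans cs [] i)
          = (pvGoB cs oq nq i 0 st []).flatten) ∧
       (∀ stack st prev, stack ≠ [] → stack.getLast? = some st →
          st ≤ i → st < cs.length → prev ≤ st →
          pvRenderA cs oq nq prev (pvIterSpans cs stack i)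
            = (cs.take st).drop prev ++ (pvGoB cs oq nq i stack.length st []).flatten)) := by
  intro m
  induction m with
  | zero => intro i hm; omega
  | succ m ih =>
    intro i hm
    by_cases hi : i < cs.length
    · have hs3 := pvSkipDelim_le cs ((cs.drop i).take 3) (i + 3)
      have hs1 := pvSkipDelim_le cs [cs[i]] (i + 1)
      constructor
      · -- outside mode
        intro st
        rw [pvIterSpans.eq_def, pvGoB.eq_def]
        simp only [hi, dif_pos]
        by_cases h1 : cs[i] = '{'
        · rw [if_pos h1, if_pos h1]
          by_cases h2 : i + 1 < cs.length ∧ cs.getD (i + 1) ' ' = '{'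
          · have h2c : cs[i + 1] = '{' := by
              rw [← List.getD_eq_getElem cs ' ' h2.1]; exact h2.2
            rw [if_pos (by simp [h2.1, h2c]), if_pos (by simp [h2.1, h2c])]
            rw [pvGoB_append cs oq nq (cs.length - (i+2) + 1) _ _ _ (by omega)]
            have hlb := pvIterSpans_lb cs (cs.length - (i+2) + 1) (i+2) [] (by omega) (by simp)
            rw [pvConsStep cs oq nq i hi _
                  (fun se hse => by have := hlb se hse; simp only [List.getLastD_nil] at this; omega),
                pvConsStep cs oq nq (i+1) h2.1 _
                  (fun se hse => by have := hlb se hse; simp only [List.getLastD_nil] at this; omega)]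
            rw [(ih (i+2) (by omega)).1 st]
            simp [h1, h2c]
          · have h2' : ¬(i + 1 < cs.length ∧ cs[i + 1]?.getD ' ' = '{') := by
              intro hc
              exact h2 ⟨hc.1, by rw [List.getD_eq_getElem?_getD]; exact hc.2⟩
            rw [if_neg (by simp [h2']), if_neg (by simp [h2'])]
            have := (ih (i+1) (by omega)).2 [i] i i (by simp) (by simp) (by omega) hi (le_refl i)
            simpa [List.drop_eq_nil_of_le] using this
        · rw [if_neg h1, if_neg h1]
          by_cases h3 : cs[i] = '}'
          · rw [if_pos h3, if_pos h3]
            rw [pvGoB_append cs oq nq (cs.length - (i+1) + 1) _ _ _ (by omega)]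
            have hlb := pvIterSpans_lb cs (cs.length - (i+1) + 1) (i+1) [] (by omega) (by simp)
            rw [pvConsStep cs oq nq i hi _
                  (fun se hse => by have := hlb se hse; simp only [List.getLastD_nil] at this; omega)]
            rw [(ih (i+1) (by omega)).1 st]
            simp
          · rw [if_neg h3, if_neg h3]
            rw [if_neg (by simp), if_neg (by simp)]
            rw [pvGoB_append cs oq nq (cs.length - (i+1) + 1) _ _ _ (by omega)]
            have hlb := pvIterSpans_lb cs (cs.length - (i+1) + 1) (i+1) [] (by omega) (by simp)
            rw [pvConsStep cs oq nq i hi _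
                  (fun se hse => by have := hlb se hse; simp only [List.getLastD_nil] at this; omega)]
            rw [(ih (i+1) (by omega)).1 st]
            simp
      · -- inside mode
        intro stack st prev hne hlast hsti hstn hprev
        have hlenne : stack.length ≠ 0 := by simpa [List.length_eq_zero_iff] using hne
        rw [pvIterSpans.eq_def, pvGoB.eq_def]
        simp only [hi, dif_pos]
        by_cases h1 : cs[i] = '{'
        · rw [if_pos h1, if_pos h1]
          rw [if_neg (fun hc => hne hc.1), if_neg (fun hc => hlenne hc.1)]
          simp only [if_neg hlenne]
          have hlast' : (i :: stack).getLast? = some st := by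
            rcases stack with _ | ⟨a, rest⟩
            · exact absurd rfl hne
            · rwa [List.getLast?_cons_cons]
          have := (ih (i+1) (by omega)).2 (i :: stack) st prev (by simp) hlast'
            (by omega) hstn hprev
          simpa using this
        · rw [if_neg h1, if_neg h1]
          by_cases h3 : cs[i] = '}'
          · rw [if_pos h3, if_pos h3]
            rcases stack with _ | ⟨j, rest⟩
            · exact absurd rfl hne
            · dsimp only
              rcases rest with _ | ⟨a, rest'⟩
              · -- closing the outermost brace
                have hj : j = st := by simpa using hlast
                subst hj
                rw [if_pos rfl]
                rw [if_neg (by simp), if_pos (by simp)]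
                rw [pvGoB_append cs oq nq (cs.length - (i+1) + 1) _ _ _ (by omega)]
                simp only [pvRenderA]
                rw [(ih (i+1) (by omega)).1 j]
                simp
              · rw [if_neg (by simp)]
                rw [if_neg (by simp), if_neg (by simp)]
                have hlast' : (a :: rest').getLast? = some st := by
                  rwa [List.getLast?_cons_cons] at hlast
                have := (ih (i+1) (by omega)).2 (a :: rest') st prev (by simp) hlast'
                  (by omega) hstn hprev
                simpa using this
          · rw [if_neg h3, if_neg h3]
            rw [if_pos hne, if_pos hlenne]
            by_cases h5 : (cs.drop i).take 3 = ['\'', '\'', '\''] ∨ (cs.drop i).take 3 = ['"', '"', '"']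
            · rw [if_pos h5, if_pos h5]
              exact (ih _ (by omega)).2 stack st prev hne hlast (by omega) hstn hprev
            · rw [if_neg h5, if_neg h5]
              by_cases h6 : cs[i] = '\'' ∨ cs[i] = '"'
              · rw [if_pos h6, if_pos h6]
                exact (ih _ (by omega)).2 stack st prev hne hlast (by omega) hstn hprev
              · rw [if_neg h6, if_neg h6]
                exact (ih _ (by omega)).2 stack st prev hne hlast (by omega) hstn hprev
    · constructor
      · intro st
        rw [pvIterSpans.eq_def, pvGoB.eq_def]
        simp [hi, pvRenderA, List.drop_eq_nil_of_le (by omega : cs.length ≤ i)]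
      · intro stack st prev hne hlast hsti hstn hprev
        have hlenne : stack.length ≠ 0 := by simpa [List.length_eq_zero_iff] using hne
        rw [pvIterSpans.eq_def, pvGoB.eq_def]
        simp only [hi, dif_neg, not_false_iff, if_neg, hlenne, ite_not]
        have := pvSliceSplit cs prev st cs.length hprev (le_of_lt hstn) (le_of_lt hstn)
        rw [List.take_length] at this
        simp [pvRenderA, this]

-- ===== VERDICT (by name: the statement is the Claim_ definition above) =====
theorem toggle_fexpr_quotes_py_spec : Claim_equal_toggle_fexpr_quotes_py := by
  intro fstring old_quote _
  unfold Spec_toggle_fexpr_quotes_py toggle_fexpr_quotes_py toggle_fexpr_quotes_py_alt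
  dsimp only
  congr 1
  rw [pvFoldA_render]
  simp only [List.flatten_nil, List.nil_append]
  exact (pvMain fstring.toList old_quote.toList _ (fstring.toList.length + 1) 0 (by omega)).1 0
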